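-- pv_equiv track=rewrite | github.com/yneo918/CNN_to_Verilog | optim_cnn/programs/optim.py | bit_adder
-- ===== SOURCE A (Python) =====
-- def bit_adder(x,bit_width):
-- 	p = int(x)
-- 	n = bit_width
-- 	while p%2 == 0 and n != 0:
-- 		p //= 2
-- 		n -= 1
-- 	n = 0 if n == 0 else n + bit_width
-- 	return n
--
-- bit_width = 8
-- ===== SOURCE B (Python) =====
-- def bit_adder(x, bit_width):
--     p = int(x)
--     if p == 0:
--         return 0
--     tz = (p & -p).bit_length() - 1
--     if 0 <= bit_width <= tz:
--         return 0
--     return 2 * bit_width - tz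
-- ===== Notes on version B (the rewrite author's own statement) =====
-- stated objective: alternative
-- what changed: Replaced the trailing-zero-stripping while loop (one division per trailing zero bit, bit_width iterations when x is 0) with the closed-form bit trick tz = (p & -p).bit_length() - 1 and a direct formula (0, or 2*bit_width - tz), with an explicit zero check.
import Mathlib
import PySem

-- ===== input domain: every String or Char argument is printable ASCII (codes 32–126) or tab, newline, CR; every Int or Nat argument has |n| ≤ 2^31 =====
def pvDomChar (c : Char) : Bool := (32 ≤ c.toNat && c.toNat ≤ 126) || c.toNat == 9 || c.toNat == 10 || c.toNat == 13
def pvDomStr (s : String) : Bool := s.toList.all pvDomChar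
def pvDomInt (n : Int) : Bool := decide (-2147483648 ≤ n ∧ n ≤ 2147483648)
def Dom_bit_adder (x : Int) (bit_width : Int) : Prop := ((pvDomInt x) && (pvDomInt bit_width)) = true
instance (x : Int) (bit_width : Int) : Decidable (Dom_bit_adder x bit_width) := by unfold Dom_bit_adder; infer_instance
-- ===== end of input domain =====

-- B replaces A's trailing-zero-stripping while loop by the closed-form bit trick
-- tz = (p & -p).bit_length() - 1 (objective: alternative, loop-free formulation).

-- ===== PORT A =====
-- A's while loop; the fuel bounds its iterations (≤ |p| halvings when p ≠ 0, ≤ n decrements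
-- when p = 0 and n > 0) and is exhausted only where the Python loop diverges (excluded by Pre_).
def bitAdderLoop : Nat → Int → Int → Int × Int
  | 0, p, n => (p, n)
  | f + 1, p, n =>
    if PySem.Int.mod p 2 = 0 ∧ n ≠ 0 then
      bitAdderLoop f (PySem.Int.floordiv p 2) (n - 1)
    else (p, n)

def bit_adder (x : Int) (bit_width : Int) : Int :=
  let p : Int := x
  let r := bitAdderLoop (x.natAbs + bit_width.toNat + 1) p bit_width
  if r.2 = 0 then 0 else r.2 + bit_width

-- ===== PORT B =====
def bit_adder_alt (x : Int) (bit_width : Int) : Int :=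
  let p : Int := x
  if p = 0 then 0
  else
    let tz : Int := (PySem.Int.bitLength (PySem.Int.band p (-p)) : Int) - 1
    if 0 ≤ bit_width ∧ bit_width ≤ tz then 0
    else 2 * bit_width - tz

-- ===== PRECONDITION & SPEC =====
-- Pre_ excludes only x = 0 with negative bit_width, where A's while loop never terminates.
def Pre_bit_adder (x : Int) (bit_width : Int) : Prop := ¬ (x = 0 ∧ bit_width < 0)
instance (x : Int) (bit_width : Int) : Decidable (Pre_bit_adder x bit_width) := by
  unfold Pre_bit_adder; infer_instance
def pvWitness_bit_adder : Int × Int := (12, 8)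

def Spec_bit_adder (x : Int) (bit_width : Int) (out : Int) : Prop := out = bit_adder_alt x bit_width
instance (x : Int) (bit_width : Int) (out : Int) : Decidable (Spec_bit_adder x bit_width out) := by
  unfold Spec_bit_adder; infer_instance

-- ===== CLAIM (what is proved, stated in full; the proofs are below) =====
def Claim_equal_bit_adder : Prop := ∀ (x : Int) (bit_width : Int), Dom_bit_adder x bit_width → Pre_bit_adder x bit_width → Spec_bit_adder x bit_width (bit_adder x bit_width)

-- ===== LEMMAS AND PROOFS =====

-- band p (-p) is computed on |p| as m - (m &&& (m-1)), the lowest set bit of |p|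
theorem band_neg_self_eq (p : Int) (hp : p ≠ 0) :
    PySem.Int.band p (-p) = ((p.natAbs - (p.natAbs &&& (p.natAbs - 1)) : Nat) : Int) := by
  rcases lt_or_gt_of_ne hp with h | h
  · have h0 : ¬ (0 ≤ p) := by omega
    have h1 : (0:Int) ≤ -p := by omega
    have e1 : (-p).toNat = p.natAbs := by omega
    have e2 : (-p - 1).toNat = p.natAbs - 1 := by omega
    simp only [PySem.Int.band, h0, h1, if_true, if_false, e1, e2]
  · have h0 : (0:Int) ≤ p := by omega
    have h1 : ¬ ((0:Int) ≤ -p) := by omega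
    have e1 : p.toNat = p.natAbs := by omega
    have e2 : (-(-p) - 1).toNat = p.natAbs - 1 := by omega
    simp only [PySem.Int.band, h0, h1, if_true, if_false, e1, e2]

theorem nat_and_pred_lt (m : Nat) (hm : 0 < m) : m &&& (m - 1) < m := by
  have := Nat.and_le_right (n := m) (m := m - 1)
  omega

theorem odd_and_pred (k : Nat) : (2*k+1) &&& (2*k) = 2*k := by
  apply Nat.eq_of_testBit_eq
  intro i
  cases i with
  | zero => simp [Nat.testBit_zero, Nat.mul_mod_right]
  | succ i =>
    have e : (2*k+1)/2 = k := by omega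
    have e2 : (2*k)/2 = k := by omega
    rw [Nat.testBit_and]
    simp [Nat.testBit_add_one, e, e2]

theorem even_and_pred (k : Nat) (hk : 0 < k) : (2*k) &&& (2*k - 1) = 2*(k &&& (k-1)) := by
  apply Nat.eq_of_testBit_eq
  intro i
  cases i with
  | zero => simp [Nat.testBit_zero, Nat.mul_mod_right]
  | succ i =>
    have e : (2*k-1)/2 = k - 1 := by omega
    have e2 : (2*k)/2 = k := by omega
    have e3 : (2*(k &&& (k-1)))/2 = k &&& (k-1) := by omega
    rw [Nat.testBit_and]
    simp [Nat.testBit_add_one, e, e2, e3, Nat.testBit_and]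

theorem bitLength_pos (n : Int) (h : n ≠ 0) : 1 ≤ PySem.Int.bitLength n := by
  by_contra hc
  have h0 : PySem.Int.bitLength n = 0 := by omega
  have := PySem.Int.lt_two_pow_bitLength n
  rw [h0] at this
  simp at this
  omega

theorem tz_nonneg (p : Int) (hp : p ≠ 0) :
    (0 : Int) ≤ (PySem.Int.bitLength (PySem.Int.band p (-p)) : Int) - 1 := by
  have hm : 0 < p.natAbs := Int.natAbs_pos.mpr hp
  have hb : PySem.Int.band p (-p) ≠ 0 := by
    rw [band_neg_self_eq p hp]
    have := nat_and_pred_lt p.natAbs hm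
    simp
    omega
  have := bitLength_pos _ hb
  omega

theorem odd_of_mod_ne (p : Int) (ho : PySem.Int.mod p 2 ≠ 0) : p.natAbs % 2 = 1 := by
  rw [Ne, PySem.Int.mod_eq_zero_iff_dvd] at ho
  rw [← Int.natAbs_dvd_natAbs] at ho
  simp at ho
  omega

theorem tz_odd (p : Int) (hp : p ≠ 0) (ho : PySem.Int.mod p 2 ≠ 0) :
    (PySem.Int.bitLength (PySem.Int.band p (-p)) : Int) - 1 = 0 := by
  have hodd := odd_of_mod_ne p ho
  obtain ⟨k, hk⟩ : ∃ k, p.natAbs = 2*k+1 := ⟨p.natAbs/2, by omega⟩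
  rw [band_neg_self_eq p hp, hk]
  have h1 : (2*k+1) - ((2*k+1) &&& (2*k+1-1)) = 1 := by
    have h2 : 2*k+1-1 = 2*k := by omega
    rw [h2, odd_and_pred]
    omega
  rw [h1]
  norm_num
  decide

theorem tz_even (p : Int) (hp : p ≠ 0) (he : PySem.Int.mod p 2 = 0) :
    (PySem.Int.bitLength (PySem.Int.band p (-p)) : Int) - 1
      = ((PySem.Int.bitLength (PySem.Int.band (PySem.Int.floordiv p 2) (-(PySem.Int.floordiv p 2))) : Int) - 1) + 1
    ∧ PySem.Int.floordiv p 2 ≠ 0 := by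
  rw [PySem.Int.mod_eq_zero_iff_dvd] at he
  obtain ⟨c, hc⟩ := he
  have hq : PySem.Int.floordiv p 2 = c := by
    rw [PySem.Int.floordiv_eq_ediv_of_pos (by norm_num), hc]
    exact Int.mul_ediv_cancel_left c (by norm_num)
  have hc0 : c ≠ 0 := by rintro rfl; simp at hc; exact hp hc
  have hmk : p.natAbs = 2 * c.natAbs := by rw [hc]; simp [Int.natAbs_mul]
  have hk0 : 0 < c.natAbs := Int.natAbs_pos.mpr hc0
  constructor
  · rw [band_neg_self_eq p hp, hq, band_neg_self_eq c hc0]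
    rw [hmk]
    rw [even_and_pred c.natAbs hk0]
    have e2 : 2*c.natAbs - 2*(c.natAbs &&& (c.natAbs - 1)) = 2*(c.natAbs - (c.natAbs &&& (c.natAbs - 1))) := by
      have := nat_and_pred_lt c.natAbs hk0
      omega
    rw [e2]
    have hl : 0 < c.natAbs - (c.natAbs &&& (c.natAbs - 1)) := by
      have := nat_and_pred_lt c.natAbs hk0; omega
    have hb := PySem.Int.bitLength_natCast (m := 2*(c.natAbs - (c.natAbs &&& (c.natAbs - 1)))) (by omega)
    have e3 : (2*(c.natAbs - (c.natAbs &&& (c.natAbs - 1))))/2 = c.natAbs - (c.natAbs &&& (c.natAbs - 1)) := by omega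
    rw [e3] at hb
    rw [hb]
    push_cast
    ring
  · rw [hq]; exact hc0

-- the loop's final n, characterised by tz (for p ≠ 0, with enough fuel)
theorem loop_char (f : Nat) (p n : Int) (hp : p ≠ 0) (hf : p.natAbs ≤ f) :
    (bitAdderLoop f p n).2 =
      (if n = 0 then n else
        if 0 ≤ n ∧ n ≤ (PySem.Int.bitLength (PySem.Int.band p (-p)) : Int) - 1 then 0
        else n - ((PySem.Int.bitLength (PySem.Int.band p (-p)) : Int) - 1)) := by
  induction f generalizing p n with
  | zero =>
    exact absurd (Int.natAbs_pos.mpr hp) (by omega)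
  | succ f ih =>
    by_cases hn : n = 0
    · subst hn
      simp [bitAdderLoop]
    · by_cases hmod : PySem.Int.mod p 2 = 0
      · obtain ⟨htz, hq0⟩ := tz_even p hp hmod
        have hqtz := tz_nonneg _ hq0
        have hm2 : 2 ≤ p.natAbs := by
          have h1 : 0 < p.natAbs := Int.natAbs_pos.mpr hp
          rcases Nat.lt_or_ge p.natAbs 2 with h | h
          · exfalso
            have : p.natAbs = 1 := by omega
            have : p = 1 ∨ p = -1 := by omega
            have hodd : PySem.Int.mod p 2 ≠ 0 := by
              rcases this with h | h <;> subst h <;> decide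
            exact hodd hmod
          · exact h
        have hqabs : (PySem.Int.floordiv p 2).natAbs ≤ f := by
          rw [PySem.Int.floordiv_eq_ediv_of_pos (by norm_num)]
          have : (p / 2).natAbs = p.natAbs / 2 := by
            rcases PySem.Int.mod_eq_zero_iff_dvd p 2 |>.mp hmod with ⟨c, hc⟩
            subst hc
            rw [Int.mul_ediv_cancel_left c (by norm_num)]
            simp [Int.natAbs_mul]
          omega
        rw [show bitAdderLoop (f+1) p n
              = bitAdderLoop f (PySem.Int.floordiv p 2) (n - 1) by
            simp only [bitAdderLoop]; exact if_pos ⟨hmod, hn⟩]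
        rw [ih _ _ hq0 hqabs, htz]
        split_ifs <;> try omega
      · rw [show bitAdderLoop (f+1) p n = (p, n) by
            simp only [bitAdderLoop]; exact if_neg (fun h => hmod h.1)]
        have htz := tz_odd p hp hmod
        rw [htz]
        split_ifs <;> try omega

-- when p = 0 and n ≥ 0 the loop just counts n down to 0
theorem loop_zero (f : Nat) (n : Int) (hn : 0 ≤ n) (hf : n.toNat < f) :
    bitAdderLoop f 0 n = (0, 0) := by
  induction f generalizing n with
  | zero => omega
  | succ f ih =>
    by_cases h : n = 0
    · subst h; simp [bitAdderLoop]
    · rw [show bitAdderLoop (f+1) 0 n = bitAdderLoop f (PySem.Int.floordiv 0 2) (n - 1) by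
        simp only [bitAdderLoop]; exact if_pos ⟨by decide, h⟩]
      rw [show PySem.Int.floordiv 0 2 = 0 from by decide]
      exact ih (n-1) (by omega) (by omega)

-- ===== VERDICT (by name: the statement is the Claim_ definition above) =====
theorem bit_adder_spec : Claim_equal_bit_adder := by
  intro x bw hdom hpre
  unfold Spec_bit_adder
  unfold Pre_bit_adder at hpre
  by_cases hx : x = 0
  · subst hx
    have hbw : 0 ≤ bw := by omega
    simp only [bit_adder, bit_adder_alt]
    rw [loop_zero _ bw hbw (by simp)]
    simp
  · have htznn := tz_nonneg x hx
    simp only [bit_adder, bit_adder_alt, hx]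
    rw [loop_char _ x bw hx (by omega)]
    split_ifs <;> try omega
    exact False.elim (by assumption)
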